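-- pv_equiv track=rewrite | github.com/MhatreNikhil36/DSA | 1131-count-substrings-with-only-one-distinct-letter/1131-count-substrings-with-only-one-distinct-letter.py | countLetters
-- ===== SOURCE A (Python) =====
-- def countLetters(s: str) -> int:
--     n=len(s)
--     ans=0
--     c=0
--     m=dict()
--     i=0
--     while i<n:
--         if i>0 and s[i]==s[i-1]:
--             c+=1
--         else:
--             c=1
--         ans+=c
--         i+=1
--     return ans
-- ===== SOURCE B (Python) =====
-- def run_lengths(chars):
--     if not chars:
--         return []
--     out = []
--     cur = chars[0]
--     k = 1
--     for ch in chars[1:]: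
--         if ch == cur:
--             k += 1
--         else:
--             out.append(k)
--             cur = ch
--             k = 1
--     out.append(k)
--     return out
--
--
-- def countLetters(s: str) -> int:
--     return sum(L * (L + 1) // 2 for L in run_lengths(list(s)))
-- ===== Notes on version B (the rewrite author's own statement) =====
-- stated objective: idiomatic
-- what changed: B splits the string into maximal runs of equal characters and sums the closed-form triangular count L*(L+1)//2 per run, instead of A's per-index running-counter accumulation.
import Mathlib
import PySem

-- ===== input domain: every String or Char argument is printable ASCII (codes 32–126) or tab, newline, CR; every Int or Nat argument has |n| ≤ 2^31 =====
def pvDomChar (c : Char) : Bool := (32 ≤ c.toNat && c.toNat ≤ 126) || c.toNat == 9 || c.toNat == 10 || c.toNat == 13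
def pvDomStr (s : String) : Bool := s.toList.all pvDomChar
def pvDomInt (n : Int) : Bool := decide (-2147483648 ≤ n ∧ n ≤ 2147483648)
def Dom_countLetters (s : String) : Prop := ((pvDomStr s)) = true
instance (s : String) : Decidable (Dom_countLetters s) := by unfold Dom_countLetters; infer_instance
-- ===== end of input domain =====

-- B replaces A's per-index running-counter scan by grouping the string into maximal
-- runs of equal characters and summing the closed form L*(L+1)//2 per run (idiomatic; same O(n) cost).

-- ===== PORT A =====
-- literal port of A's while loop: state (c, ans), index i counts up to n; s[i] via toList.getD (always in range here)
def countLettersLoop (chars : List Char) (n i : Nat) (c ans : Int) : Int :=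
  if i < n then
    let c' : Int := if 0 < i ∧ chars.getD i ' ' = chars.getD (i - 1) ' ' then c + 1 else 1
    countLettersLoop chars n (i + 1) c' (ans + c')
  else ans
termination_by n - i

def countLetters (s : String) : Int :=
  countLettersLoop s.toList s.toList.length 0 0 0

-- ===== PORT B =====
-- port of Source B's run_lengths: the for-loop over chars[1:] with state (out, cur, k); appends k at the end
def runLengthsLoop (rest : List Char) (out : List Int) (cur : Char) (k : Int) : List Int × Char × Int :=
  rest.foldl (fun (st : List Int × Char × Int) ch =>
    let (out, cur, k) := st
    if ch = cur then (out, cur, k + 1) else (out ++ [k], ch, 1)) (out, cur, k)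

def run_lengths (chars : List Char) : List Int :=
  match chars with
  | [] => []
  | c0 :: rest =>
    let st := runLengthsLoop rest [] c0 1
    st.1 ++ [st.2.2]

def countLetters_alt (s : String) : Int :=
  ((run_lengths s.toList).map (fun L => PySem.Int.floordiv (L * (L + 1)) 2)).sum

-- ===== PRECONDITION & SPEC =====
def Spec_countLetters (s : String) (out : Int) : Prop := out = countLetters_alt s
instance (s : String) (out : Int) : Decidable (Spec_countLetters s out) := by unfold Spec_countLetters; infer_instance

-- ===== CLAIM (what is proved, stated in full; the proofs are below) =====
def Claim_equal_countLetters : Prop := ∀ (s : String), Dom_countLetters s → Spec_countLetters s (countLetters s)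

-- ===== LEMMAS AND PROOFS =====

-- proof-side canonical scan of A: previous char d, run counter c, accumulator ans
def scanGo (d : Char) (c ans : Int) : List Char → Int
  | [] => ans
  | e :: rest =>
    let c' : Int := if e = d then c + 1 else 1
    scanGo e c' (ans + c') rest

-- proof-side structural form of run_lengths' loop
def runsGo (d : Char) (k : Int) : List Char → List Int
  | [] => [k]
  | e :: rest => if e = d then runsGo d (k + 1) rest else k :: runsGo e 1 rest

def tri (c : Int) : Int := PySem.Int.floordiv (c * (c + 1)) 2

lemma tri_succ (c : Int) : tri (c + 1) = tri c + (c + 1) := by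
  obtain ⟨k, hk⟩ : (2 : Int) ∣ c * (c + 1) := (Int.even_mul_succ_self c).two_dvd
  have h2 : (c + 1) * (c + 1 + 1) = 2 * (k + (c + 1)) := by linear_combination hk
  simp only [tri, hk, h2, PySem.Int.floordiv]
  rw [Int.mul_fdiv_cancel_left _ (by norm_num), Int.mul_fdiv_cancel_left _ (by norm_num)]

lemma tri_one : tri 1 = 1 := by decide

-- A's loop (from index ≥ 1, with previous char d) equals the canonical scan over the remaining suffix
lemma loop_eq_scanGo (chars : List Char) (i : Nat) (c ans : Int) (d : Char)
    (h1 : 1 ≤ i) (hd : chars.getD (i - 1) ' ' = d) :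
    countLettersLoop chars chars.length i c ans = scanGo d c ans (chars.drop i) := by
  by_cases hlt : i < chars.length
  · have hdrop : chars.drop i = chars[i] :: chars.drop (i + 1) := List.drop_eq_getElem_cons hlt
    have hget : chars.getD i ' ' = chars[i] := List.getD_eq_getElem chars ' ' hlt
    have hcond : (0 < i ∧ chars.getD i ' ' = chars.getD (i - 1) ' ') ↔ (chars[i] = d) := by
      rw [hget, hd]
      exact ⟨fun h => h.2, fun h => ⟨h1, h⟩⟩
    have hif : (if 0 < i ∧ chars.getD i ' ' = chars.getD (i - 1) ' ' then c + 1 else (1 : Int))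
        = (if chars[i] = d then c + 1 else 1) := if_congr hcond rfl rfl
    rw [countLettersLoop, if_pos hlt, hdrop]
    simp only [scanGo, hif]
    exact loop_eq_scanGo chars (i + 1) _ _ chars[i] (by omega)
      (by simp only [Nat.add_sub_cancel]; exact hget)
  · rw [countLettersLoop, if_neg hlt, List.drop_eq_nil_of_le (by omega)]
    rfl
termination_by chars.length - i

-- the canonical scan equals the triangular sum over the structural run lengths
lemma scanGo_eq_runs (rest : List Char) : ∀ (d : Char) (c ans : Int),
    scanGo d c ans rest = ans + ((runsGo d c rest).map tri).sum - tri c := by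
  induction rest with
  | nil => intro d c ans; simp [scanGo, runsGo]
  | cons e rest ih =>
    intro d c ans
    by_cases h : e = d
    · subst h
      simp [scanGo, runsGo, ih, tri_succ]
      ring
    · simp only [scanGo, runsGo, if_neg h, ih, List.map_cons, List.sum_cons, tri_one]
      ring

-- Source B's foldl-with-append loop equals the structural runsGo
lemma runLengthsLoop_eq (rest : List Char) : ∀ (out : List Int) (cur : Char) (k : Int),
    (runLengthsLoop rest out cur k).1 ++ [(runLengthsLoop rest out cur k).2.2]
      = out ++ runsGo cur k rest := by
  induction rest with
  | nil => intro out cur k; simp [runLengthsLoop, runsGo]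
  | cons e rest ih =>
    intro out cur k
    by_cases h : e = cur
    · have hstep : runLengthsLoop (e :: rest) out cur k = runLengthsLoop rest out cur (k + 1) := by
        simp [runLengthsLoop, h]
      rw [hstep, ih, runsGo, if_pos h]
    · have hstep : runLengthsLoop (e :: rest) out cur k = runLengthsLoop rest (out ++ [k]) e 1 := by
        simp [runLengthsLoop, h]
      rw [hstep, ih, runsGo, if_neg h]
      simp

lemma run_lengths_eq (chars : List Char) :
    run_lengths chars = match chars with | [] => [] | d :: rest => runsGo d 1 rest := by
  cases chars with
  | nil => rfl
  | cons d rest =>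
    simpa [run_lengths] using runLengthsLoop_eq rest [] d 1

-- ===== VERDICT (by name: the statement is the Claim_ definition above) =====
theorem countLetters_spec : Claim_equal_countLetters := by
  intro s _
  show countLetters s = countLetters_alt s
  unfold countLetters countLetters_alt
  rw [run_lengths_eq]
  cases hs : s.toList with
  | nil => simp [countLettersLoop]
  | cons d rest =>
    have hstep : countLettersLoop (d :: rest) (d :: rest).length 0 0 0
        = countLettersLoop (d :: rest) (d :: rest).length 1 1 1 := by
      rw [countLettersLoop]
      norm_num
    rw [hstep, loop_eq_scanGo (d :: rest) 1 1 1 d (le_refl 1) (by simp)]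
    have hdrop : (d :: rest).drop 1 = rest := rfl
    rw [hdrop, scanGo_eq_runs rest d 1 1, tri_one]
    have htri : (fun L => PySem.Int.floordiv (L * (L + 1)) 2) = tri := rfl
    rw [htri]
    ring
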